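-- pv_equiv track=rewrite | github.com/flaviolunaferreira/sd-06-restaurant-orders | src/feedback_client.py | how_many_days_never_goes
-- ===== SOURCE A (Python) =====
-- def how_many_days_never_goes(data_orders, client):
--     """Quais dias 'joao' nunca foi na lanchonete? """
--     days_open = set()
--     days_order_food = set()
--
--     for item in data_orders:
--         days_open.add(item[2])
--
--         if item[0] == client:
--             days_order_food.add(item[2])
--
--     return days_open.difference(days_order_food)
-- ===== SOURCE B (Python) =====
-- def how_many_days_never_goes(data_orders, client):
--     """Quais dias 'joao' nunca foi na lanchonete? """
--     clients_by_day = {}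
--     for item in data_orders:
--         clients_by_day.setdefault(item[2], set()).add(item[0])
--     return {day for day, clients in clients_by_day.items() if client not in clients}
-- ===== Notes on version B (the rewrite author's own statement) =====
-- stated objective: alternative
-- what changed: Instead of maintaining two parallel sets (days open, days the client ordered) and subtracting them, B first groups orders into a dict mapping each day to the set of clients who ordered that day, then collects the days whose client-set does not contain the client.
import Mathlib
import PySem

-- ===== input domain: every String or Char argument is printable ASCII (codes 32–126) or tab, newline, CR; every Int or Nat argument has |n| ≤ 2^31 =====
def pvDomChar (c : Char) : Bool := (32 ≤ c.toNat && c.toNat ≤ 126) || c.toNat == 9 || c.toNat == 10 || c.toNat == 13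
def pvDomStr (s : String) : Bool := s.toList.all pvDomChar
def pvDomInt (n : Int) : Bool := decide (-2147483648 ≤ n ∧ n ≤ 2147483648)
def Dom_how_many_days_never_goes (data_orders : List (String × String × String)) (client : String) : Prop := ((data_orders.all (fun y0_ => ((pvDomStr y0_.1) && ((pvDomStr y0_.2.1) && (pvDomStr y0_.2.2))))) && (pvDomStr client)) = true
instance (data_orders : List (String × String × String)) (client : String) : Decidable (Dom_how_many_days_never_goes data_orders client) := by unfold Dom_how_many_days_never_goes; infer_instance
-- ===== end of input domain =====

-- B groups orders into a dict day → set of clients and filters days by membership, instead of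
-- subtracting two parallel sets; same cost, different decomposition.


-- ===== PORT A =====
def how_many_days_never_goes (data_orders : List (String × String × String)) (client : String) : List String :=
  let st := data_orders.foldl
    (fun (st : PySem.Set String × PySem.Set String) item =>
      (PySem.Set.add st.1 item.2.2,
       if item.1 == client then PySem.Set.add st.2 item.2.2 else st.2))
    (PySem.Set.empty, PySem.Set.empty)
  PySem.Set.diff st.1 st.2

-- ===== PORT B =====
def how_many_days_never_goes_alt (data_orders : List (String × String × String)) (client : String) : List String :=
  let d := data_orders.foldl
    (fun (d : PySem.Dict String (PySem.Set String)) item =>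
      d.insert item.2.2 (PySem.Set.add (d.getD item.2.2 PySem.Set.empty) item.1))
    PySem.Dict.empty
  PySem.Set.ofList ((d.items.filter (fun p => !(PySem.Set.contains p.2 client))).map (·.1))

-- ===== PRECONDITION & SPEC =====
def Spec_how_many_days_never_goes (data_orders : List (String × String × String)) (client : String) (out : List String) : Prop := out = how_many_days_never_goes_alt data_orders client
instance (data_orders : List (String × String × String)) (client : String) (out : List String) : Decidable (Spec_how_many_days_never_goes data_orders client out) := by unfold Spec_how_many_days_never_goes; infer_instance

-- ===== CLAIM (what is proved, stated in full; the proofs are below) =====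
def Claim_equal_how_many_days_never_goes : Prop := ∀ (data_orders : List (String × String × String)) (client : String), Dom_how_many_days_never_goes data_orders client → Spec_how_many_days_never_goes data_orders client (how_many_days_never_goes data_orders client)

-- ===== LEMMAS AND PROOFS =====

-- inserting a key into a dict adds it to the keys-as-a-set
lemma hmd_keys_insert_add (d : PySem.Dict String (PySem.Set String)) (k : String) (v : PySem.Set String) :
    (d.insert k v).keys = PySem.Set.add d.keys k := by
  by_cases h : d.contains k = true
  · rw [PySem.Dict.keys_insert_of_contains d v h,
      PySem.Set.add_of_mem ((PySem.Dict.contains_iff_mem_keys _ _).mp h)]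
  · have h' : d.contains k = false := by simpa using h
    rw [PySem.Dict.keys_insert_of_not_contains d v h', PySem.Set.add_of_not_mem]
    intro hm; exact h ((PySem.Dict.contains_iff_mem_keys _ _).mpr hm)

lemma hmd_contains_add (s : PySem.Set String) (x y : String) :
    PySem.Set.contains (PySem.Set.add s x) y = (PySem.Set.contains s y || (y == x)) := by
  rw [Bool.eq_iff_iff]
  simp [PySem.Set.mem_add, or_comm]

-- the two loops, run from related states, give the same result
lemma hmd_loop_eq (client : String) :
    ∀ (l : List (String × String × String)) (s1 s2 : PySem.Set String)
      (d : PySem.Dict String (PySem.Set String)),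
      s1 = d.keys → d.keys.Nodup →
      (∀ k, PySem.Set.contains s2 k =
        PySem.Set.contains (d.getD k PySem.Set.empty) client) →
      (let st := l.foldl
        (fun (st : PySem.Set String × PySem.Set String) item =>
          (PySem.Set.add st.1 item.2.2,
           if item.1 == client then PySem.Set.add st.2 item.2.2 else st.2)) (s1, s2)
       PySem.Set.diff st.1 st.2) =
      (let d' := l.foldl
        (fun (d : PySem.Dict String (PySem.Set String)) item =>
          d.insert item.2.2 (PySem.Set.add (d.getD item.2.2 PySem.Set.empty) item.1)) d
       PySem.Set.ofList ((d'.items.filter (fun p => !(PySem.Set.contains p.2 client))).map (·.1))) := by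
  intro l
  induction l with
  | nil =>
    intro s1 s2 d h1 hnd h2
    subst h1
    simp only [List.foldl_nil]
    rw [PySem.Dict.items_eq_map_keys d hnd PySem.Set.empty, List.filter_map, List.map_map]
    have hmap : (List.map ((fun x : String × PySem.Set String => x.1) ∘ fun k => (k, d.getD k PySem.Set.empty))
        (List.filter ((fun p : String × PySem.Set String => !(PySem.Set.contains p.2 client)) ∘ fun k => (k, d.getD k PySem.Set.empty)) d.keys))
        = List.filter (fun k => !(PySem.Set.contains (d.getD k PySem.Set.empty) client)) d.keys := by
      simp [Function.comp_def]
    rw [hmap, PySem.Set.ofList_eq_self_of_nodup _ (hnd.filter _)]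
    show List.filter _ _ = _
    exact List.filter_congr (fun k _ => by simpa using congrArg (! ·) (h2 k))
  | cons hd tl ih =>
    intro s1 s2 d h1 hnd h2
    obtain ⟨c, m, day⟩ := hd
    simp only [List.foldl_cons]
    apply ih
    · rw [hmd_keys_insert_add, h1]
    · rw [hmd_keys_insert_add]
      exact PySem.Set.nodup_add _ _ hnd
    · intro k
      rw [PySem.Dict.getD_insert]
      by_cases hk : k = day
      · subst hk
        rw [if_pos rfl]
        by_cases hc : (c == client) = true
        · have hc2 : c = client := by simpa using hc
          subst hc2
          simp
        · have hc0 : (c == client) = false := by simpa using hc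
          have hc1 : (client == c) = false := by
            rw [beq_eq_false_iff_ne] at hc0 ⊢
            exact fun h => hc0 h.symm
          rw [if_neg hc, hmd_contains_add, h2 k, hc1, Bool.or_false]
      · rw [if_neg hk]
        by_cases hc : (c == client) = true
        · have hkd : (k == day) = false := by
            rw [beq_eq_false_iff_ne]; exact hk
          rw [if_pos hc, hmd_contains_add, h2 k, hkd, Bool.or_false]
        · rw [if_neg hc, h2 k]

-- ===== VERDICT (by name: the statement is the Claim_ definition above) =====
theorem how_many_days_never_goes_spec : Claim_equal_how_many_days_never_goes := by
  intro data_orders client _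
  unfold Spec_how_many_days_never_goes how_many_days_never_goes how_many_days_never_goes_alt
  exact hmd_loop_eq client data_orders _ _ _ rfl (by simp) (by intro k; simp [PySem.Set.contains, PySem.Set.empty])
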